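-- pv_equiv track=rewrite | github.com/CHUKIN/CreateQuestionsFromVideos | video_processor.py | _parse_questions_manually
-- ===== SOURCE A (Python) =====
-- from typing import List, Dict, Optional, Tuple
--
-- def _parse_questions_manually(response_text: str) -> List[Dict[str, str]]:
--     """
--     Manually parse questions if JSON parsing fails.
--
--     Parameters:
--     response_text (str): Raw response text
--
--     Returns:
--     List[Dict[str, str]]: Parsed questions
--     """
--     questions = []
--     lines = response_text.split('\n')
--
--     current_question = {}
--     for line in lines:
--         line = line.strip()
--         if '?' in line and len(line) > 10:  # Likely a question
--             if current_question:
--                 questions.append(current_question)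
--             current_question = {
--                 'question': line,
--                 'speaker': 'unknown',
--                 'type': 'general'
--             }
--
--     if current_question:
--         questions.append(current_question)
--
--     return questions
-- ===== SOURCE B (Python) =====
-- def _parse_questions_manually(response_text: str):
--     # Character-level scan: no split(); accumulate each line in a buffer and,
--     # at every newline (plus a virtual final one), strip it and emit its dict.
--     questions = []
--     buf = []
--     for ch in response_text + '\n':
--         if ch == '\n':
--             line = ''.join(buf).strip()
--             if '?' in line and len(line) > 10:
--                 questions.append({'question': line, 'speaker': 'unknown', 'type': 'general'})
--             buf = []
--         else:
--             buf.append(ch)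
--     return questions
-- ===== Notes on version B (the rewrite author's own statement) =====
-- stated objective: alternative
-- what changed: Replaced A's split-into-lines pass plus a stateful deferred-append/flush loop over the lines with a single character-level scan that maintains a line buffer and, at each newline (plus a virtual final one), strips the buffer and emits its dict immediately.
import Mathlib
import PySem

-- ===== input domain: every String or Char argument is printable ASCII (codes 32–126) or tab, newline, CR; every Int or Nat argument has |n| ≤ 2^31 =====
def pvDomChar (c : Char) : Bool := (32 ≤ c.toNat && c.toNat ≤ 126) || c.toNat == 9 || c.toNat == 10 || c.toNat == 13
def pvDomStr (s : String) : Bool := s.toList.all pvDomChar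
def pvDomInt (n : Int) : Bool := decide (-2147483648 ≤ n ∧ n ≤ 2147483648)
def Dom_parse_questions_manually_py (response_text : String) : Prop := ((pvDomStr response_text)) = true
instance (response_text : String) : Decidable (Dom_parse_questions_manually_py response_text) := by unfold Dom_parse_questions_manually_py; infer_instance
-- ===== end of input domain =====

-- B replaces A's split-lines-then-stateful-loop with a single character-level scan
-- (a line buffer flushed at each newline, emitting immediately); same return value, proved equal.


-- ===== PORT A =====
-- loop body of A: strip the line; if it looks like a question, flush the carried
-- dict (if truthy) and start a new current_question
def pvStepA (st : List (List (String × String)) × List (String × String)) (line : String) :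
    List (List (String × String)) × List (String × String) :=
  let l := PySem.Str.strip line
  if PySem.Str.isIn "?" l && decide (PySem.Str.len l > 10) then
    (if st.2 ≠ [] then st.1 ++ [st.2] else st.1,
     [("question", l), ("speaker", "unknown"), ("type", "general")])
  else st

def parse_questions_manually_py (response_text : String) : List (List (String × String)) :=
  let lines := (PySem.Str.split? response_text "\n").getD []   -- sep "\n" ≠ "": never none
  let st := lines.foldl pvStepA ([], [])
  if st.2 ≠ [] then st.1 ++ [st.2] else st.1

-- ===== PORT B =====
-- B scans the characters once; st = (questions so far, current line buffer).
-- At '\n' the buffer is stripped and, if it qualifies, its dict is appended at once.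
def pvStepB (st : List (List (String × String)) × List Char) (c : Char) :
    List (List (String × String)) × List Char :=
  if c = '\n' then
    let line := PySem.Chars.strip st.2
    if PySem.Chars.isIn ['?'] line && decide (line.length > 10) then
      (st.1 ++ [[("question", String.ofList line), ("speaker", "unknown"), ("type", "general")]], [])
    else (st.1, [])
  else (st.1, st.2 ++ [c])

def parse_questions_manually_py_alt (response_text : String) : List (List (String × String)) :=
  -- for ch in response_text + '\n': a virtual final newline flushes the last line
  ((response_text.toList ++ ['\n']).foldl pvStepB ([], [])).1

-- ===== PRECONDITION & SPEC =====
def Spec_parse_questions_manually_py (response_text : String) (out : List (List (String × String))) : Prop := out = parse_questions_manually_py_alt response_text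
instance (response_text : String) (out : List (List (String × String))) : Decidable (Spec_parse_questions_manually_py response_text out) := by unfold Spec_parse_questions_manually_py; infer_instance

-- ===== CLAIM (what is proved, stated in full; the proofs are below) =====
def Claim_equal_parse_questions_manually_py : Prop := ∀ (response_text : String), Dom_parse_questions_manually_py response_text → Spec_parse_questions_manually_py response_text (parse_questions_manually_py response_text)

-- ===== LEMMAS AND PROOFS =====

-- the filter condition, on the char-list side
def pvKeepC (l : List Char) : Bool := PySem.Chars.isIn ['?'] l && decide (l.length > 10)

-- what one (already stripped) line contributes to the output
def pvEmit (l : List Char) : List (List (String × String)) :=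
  if pvKeepC l then
    [[("question", String.ofList l), ("speaker", "unknown"), ("type", "general")]]
  else []

theorem pvStepA_eq (st : List (List (String × String)) × List (String × String)) (line : String) :
    pvStepA st line =
      if pvKeepC (PySem.Chars.strip line.toList) then
        (if st.2 ≠ [] then st.1 ++ [st.2] else st.1,
         [("question", String.ofList (PySem.Chars.strip line.toList)),
          ("speaker", "unknown"), ("type", "general")])
      else st := by
  have hstr : PySem.Str.strip line = String.ofList (PySem.Chars.strip line.toList) := by
    rw [← @String.ofList_toList (PySem.Str.strip line), PySem.Str.toList_strip]
  have hq : "?".toList = ['?'] := rfl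
  have hcond : (PySem.Str.isIn "?" (String.ofList (PySem.Chars.strip line.toList))
      && decide (PySem.Str.len (String.ofList (PySem.Chars.strip line.toList)) > 10))
      = pvKeepC (PySem.Chars.strip line.toList) := by
    simp only [PySem.Str.isIn_eq, PySem.Str.len_eq, String.toList_ofList, pvKeepC, hq]
    norm_num
  simp only [pvStepA, hstr]
  rw [hcond]

theorem pv_modifyHead_congr (f g : List Char → List Char) (h : ∀ x, f x = g x)
    (l : List (List Char)) : List.modifyHead f l = List.modifyHead g l := by
  cases l <;> simp [h]

-- PySem's fuel-based splitOn with the single-char separator '\n' is List.splitOnP (· == '\n')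
theorem pv_go_splitOnP (fuel : Nat) : ∀ (l cur : List Char) (acc : List (List Char)),
    l.length ≤ fuel →
    PySem.Chars.splitOn.go ['\n'] fuel l cur acc
      = acc.reverse ++ List.modifyHead (cur.reverse ++ ·) (List.splitOnP (fun c => c == '\n') l) := by
  induction fuel with
  | zero =>
    intro l cur acc h
    have hl : l = [] := List.length_eq_zero_iff.mp (Nat.le_zero.mp h)
    subst hl
    simp [PySem.Chars.splitOn.go, List.splitOnP_nil]
  | succ f ih =>
    intro l cur acc h
    cases l with
    | nil => simp [PySem.Chars.splitOn.go, List.splitOnP_nil]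
    | cons c rest =>
      by_cases hc : c = '\n'
      · subst hc
        have hpre : (['\n'].isPrefixOf ('\n' :: rest)) = true := by simp [List.isPrefixOf]
        rw [PySem.Chars.splitOn.go]
        simp only [hpre, if_true]
        have hdrop : List.drop (['\n'].length) ('\n' :: rest) = rest := rfl
        rw [hdrop, ih rest [] ((List.reverse cur) :: acc) (by simpa using h)]
        simp only [List.splitOnP_cons, beq_self_eq_true, if_true, List.reverse_nil,
          List.nil_append, List.modifyHead, List.reverse_cons, List.append_assoc,
          List.singleton_append]
        cases hsp : List.splitOnP (fun c => c == '\n') rest <;> simp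
      · have hpre : (['\n'].isPrefixOf (c :: rest)) = false := by
          simp [List.isPrefixOf]
          intro h'; exact absurd h'.symm hc
        rw [PySem.Chars.splitOn.go]
        simp only [hpre, Bool.false_eq_true, if_false]
        rw [ih rest (c :: cur) acc (by simpa using h)]
        rw [List.splitOnP_cons]
        have hcb : (c == '\n') = false := by simp [hc]
        simp only [hcb, Bool.false_eq_true, if_false, List.modifyHead_modifyHead]
        congr 1
        exact pv_modifyHead_congr _ _ (fun x => by simp) _

theorem pv_splitOn_newline (cs : List Char) :
    PySem.Chars.splitOn cs ['\n'] = List.splitOnP (fun c => c == '\n') cs := by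
  unfold PySem.Chars.splitOn
  rw [pv_go_splitOnP (cs.length + 1) cs [] [] (by omega)]
  cases List.splitOnP (fun c => c == '\n') cs <;> simp

-- A's loop with an arbitrary carried state: accumulated questions, the flushed carry,
-- then each remaining line's contribution in order.
theorem pvStepA_loop_inv (lines : List String) :
    ∀ (qs : List (List (String × String))) (cur : List (String × String)),
      (let st := lines.foldl pvStepA (qs, cur); if st.2 ≠ [] then st.1 ++ [st.2] else st.1)
      = qs ++ (if cur ≠ [] then [cur] else [])
          ++ lines.flatMap (fun ln => pvEmit (PySem.Chars.strip ln.toList)) := by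
  induction lines with
  | nil =>
    intro qs cur
    by_cases h : cur = [] <;> simp [h]
  | cons line rest ih =>
    intro qs cur
    rw [List.flatMap_cons, List.foldl_cons, pvStepA_eq]
    by_cases hk : pvKeepC (PySem.Chars.strip line.toList) = true
    · rw [hk]
      simp only [if_true]
      rw [ih]
      unfold pvEmit
      rw [hk]
      simp only [if_true]
      by_cases h : cur = [] <;> simp [h]
    · simp only [Bool.not_eq_true] at hk
      rw [hk]
      simp only [Bool.false_eq_true, if_false]
      rw [ih]
      unfold pvEmit
      rw [hk]
      simp

-- B's scan with an arbitrary state: the pending buffer is the head of the remaining split.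
theorem pvStepB_loop_inv (cs : List Char) :
    ∀ (out : List (List (String × String))) (buf : List Char),
      ((cs ++ ['\n']).foldl pvStepB (out, buf)).1
      = out ++ (List.modifyHead (buf ++ ·) (List.splitOnP (fun c => c == '\n') cs)).flatMap
          (fun l => pvEmit (PySem.Chars.strip l)) := by
  induction cs with
  | nil =>
    intro out buf
    simp only [List.nil_append, List.foldl_cons, List.foldl_nil, List.splitOnP_nil,
      List.modifyHead, List.flatMap_cons, List.flatMap_nil, List.append_nil]
    unfold pvStepB pvEmit pvKeepC
    by_cases hk : (PySem.Chars.isIn ['?'] (PySem.Chars.strip buf)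
        && decide ((PySem.Chars.strip buf).length > 10)) = true <;> simp [hk]
  | cons c rest ih =>
    intro out buf
    rw [List.cons_append, List.foldl_cons]
    by_cases hc : c = '\n'
    · subst hc
      have hstep : pvStepB (out, buf) '\n'
          = (out ++ pvEmit (PySem.Chars.strip buf), []) := by
        unfold pvStepB pvEmit pvKeepC
        by_cases hk : (PySem.Chars.isIn ['?'] (PySem.Chars.strip buf)
            && decide ((PySem.Chars.strip buf).length > 10)) = true <;> simp [hk]
      rw [hstep, ih, List.splitOnP_cons]
      simp only [beq_self_eq_true, if_true, List.modifyHead, List.flatMap_cons,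
        List.append_assoc, List.nil_append]
      cases List.splitOnP (fun c => c == '\n') rest <;> simp
    · have hstep : pvStepB (out, buf) c = (out, buf ++ [c]) := by
        unfold pvStepB; simp [hc]
      rw [hstep, ih, List.splitOnP_cons]
      have hcb : (c == '\n') = false := by simp [hc]
      simp only [hcb, Bool.false_eq_true, if_false, List.modifyHead_modifyHead]
      congr 2
      exact pv_modifyHead_congr _ _ (fun x => by simp) _

-- ===== VERDICT (by name: the statement is the Claim_ definition above) =====
theorem parse_questions_manually_py_spec : Claim_equal_parse_questions_manually_py := by
  intro s _
  unfold Spec_parse_questions_manually_py parse_questions_manually_py parse_questions_manually_py_alt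
  rw [pvStepB_loop_inv s.toList [] []]
  have hsplit : (PySem.Str.split? s "\n").getD []
      = (List.splitOnP (fun c => c == '\n') s.toList).map String.ofList := by
    unfold PySem.Str.split? PySem.Chars.split?
    have hq : ("\n").toList = ['\n'] := rfl
    simp [hq, pv_splitOn_newline]
  rw [hsplit]
  have h := pvStepA_loop_inv ((List.splitOnP (fun c => c == '\n') s.toList).map String.ofList) [] []
  simp only [ne_eq, not_true_eq_false, if_false, List.nil_append] at h
  rw [h]
  have hid : List.modifyHead (fun x => [] ++ x) (List.splitOnP (fun c => c == '\n') s.toList)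
      = List.splitOnP (fun c => c == '\n') s.toList := by
    cases List.splitOnP (fun c => c == '\n') s.toList <;> simp
  rw [hid, List.flatMap_map]
  simp
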